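-- pv_equiv track=rewrite | github.com/mikhailsinyakov/codewars | pick_peaks/pick_peaks.py | pick_peaks
-- ===== SOURCE A (Python) =====
-- def pick_peaks(arr):
--     reduced_arr = [[pos, num]
--                    for pos, num in enumerate(arr) if pos == 0 or num != arr[pos-1]]
--     peaks_data = [reduced_arr[i] for i in range(1, len(
--         reduced_arr)-1) if reduced_arr[i+1][1] < reduced_arr[i][1] > reduced_arr[i-1][1]]
--
--     peaks_data_t = [list(item) for item in zip(*peaks_data)]
--
--     return {
--         "pos": peaks_data_t[0] if peaks_data_t else [],
--         "peaks": peaks_data_t[1] if peaks_data_t else []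
--     }
-- ===== SOURCE B (Python) =====
-- def pick_peaks(arr):
--     # Single linear pass with a pending-peak (index, value); no reduced array, no transpose.
--     pos, peaks = [], []
--     last = None
--     for i in range(1, len(arr)):
--         if arr[i] > arr[i - 1]:
--             last = (i, arr[i])
--         elif arr[i] < arr[i - 1] and last is not None:
--             pos.append(last[0])
--             peaks.append(last[1])
--             last = None
--     return {"pos": pos, "peaks": peaks}
-- ===== Notes on version B (the rewrite author's own statement) =====
-- stated objective: faster
-- what changed: Replaced the reduced-array construction, the windowed scan over it and the zip-transpose with one linear pass over arr that keeps a pending-peak (index,value) state and appends to pos/peaks directly.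
import Mathlib
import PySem

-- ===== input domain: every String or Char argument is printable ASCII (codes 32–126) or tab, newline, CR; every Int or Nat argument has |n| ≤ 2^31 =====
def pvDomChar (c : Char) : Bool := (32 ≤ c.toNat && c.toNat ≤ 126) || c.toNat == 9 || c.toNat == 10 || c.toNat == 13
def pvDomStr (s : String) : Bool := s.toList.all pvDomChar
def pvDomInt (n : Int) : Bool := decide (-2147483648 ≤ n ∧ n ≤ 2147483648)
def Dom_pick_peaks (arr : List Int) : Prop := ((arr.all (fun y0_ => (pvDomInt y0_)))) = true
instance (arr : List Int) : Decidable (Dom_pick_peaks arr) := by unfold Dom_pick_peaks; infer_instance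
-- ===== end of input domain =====

-- B replaces A's reduced-array + windowed-scan + zip-transpose with one linear pass keeping a
-- pending-peak (index, value) state; simpler and measurably faster (constant factor: no intermediate lists).

-- ===== PORT A =====
-- reduced_arr = [[pos, num] for pos, num in enumerate(arr) if pos == 0 or num != arr[pos-1]]
def pvRed (arr : List Int) : List (Int × Int) :=
  (PySem.List.enumerate arr 0).filter
    (fun pn => pn.1 == 0 || pn.2 != PySem.List.pyGetD arr (pn.1 - 1) 0)

-- peaks_data = [reduced_arr[i] for i in range(1, len(reduced_arr)-1)
--               if reduced_arr[i+1][1] < reduced_arr[i][1] > reduced_arr[i-1][1]]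
def pvPk (r : List (Int × Int)) : List (Int × Int) :=
  ((PySem.List.pyRange 1 ((r.length : Int) - 1) 1).filter (fun i =>
      decide ((PySem.List.pyGetD r (i + 1) (0, 0)).2 < (PySem.List.pyGetD r i (0, 0)).2 ∧
              (PySem.List.pyGetD r (i - 1) (0, 0)).2 < (PySem.List.pyGetD r i (0, 0)).2))).map
    (fun i => PySem.List.pyGetD r i (0, 0))

def pick_peaks (arr : List Int) : List (String × List Int) :=
  let peaks_data := pvPk (pvRed arr)
  -- peaks_data_t = [list(item) for item in zip(*peaks_data)]  (transpose of a list of pairs)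
  let peaks_data_t : List (List Int) :=
    if peaks_data = [] then [] else [peaks_data.map (·.1), peaks_data.map (·.2)]
  [("pos", if peaks_data_t = [] then [] else peaks_data_t.getD 0 []),
   ("peaks", if peaks_data_t = [] then [] else peaks_data_t.getD 1 [])]

-- ===== PORT B =====
def pvStepB (arr : List Int) (st : Option (Int × Int) × List Int × List Int) (i : Int) :
    Option (Int × Int) × List Int × List Int :=
  if PySem.List.pyGetD arr (i - 1) 0 < PySem.List.pyGetD arr i 0 then
    (some (i, PySem.List.pyGetD arr i 0), st.2.1, st.2.2)
  else if PySem.List.pyGetD arr i 0 < PySem.List.pyGetD arr (i - 1) 0 then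
    match st.1 with
    | some pv => (none, st.2.1 ++ [pv.1], st.2.2 ++ [pv.2])
    | none => st
  else st

def pvLoopB (arr : List Int) : Option (Int × Int) × List Int × List Int :=
  (PySem.List.pyRange 1 (arr.length : Int) 1).foldl (pvStepB arr) (none, [], [])

def pick_peaks_alt (arr : List Int) : List (String × List Int) :=
  [("pos", (pvLoopB arr).2.1), ("peaks", (pvLoopB arr).2.2)]

-- ===== PRECONDITION & SPEC =====
def Spec_pick_peaks (arr : List Int) (out : List (String × List Int)) : Prop := out = pick_peaks_alt arr
instance (arr : List Int) (out : List (String × List Int)) : Decidable (Spec_pick_peaks arr out) := by unfold Spec_pick_peaks; infer_instance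

-- ===== CLAIM (what is proved, stated in full; the proofs are below) =====
def Claim_equal_pick_peaks : Prop := ∀ (arr : List Int), Dom_pick_peaks arr → Spec_pick_peaks arr (pick_peaks arr)

-- ===== LEMMAS AND PROOFS =====

-- reading an in-range index is unchanged by appending one element
theorem pvGetD_append_lt {α : Type} (xs : List α) (x d : α) (i : Int)
    (h0 : 0 ≤ i) (h1 : i < xs.length) :
    PySem.List.pyGetD (xs ++ [x]) i d = PySem.List.pyGetD xs i d := by
  rw [PySem.List.pyGetD_eq_getElem (xs ++ [x]) d h0 (by simp; omega),
      PySem.List.pyGetD_eq_getElem xs d h0 h1]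
  exact List.getElem_append_left (by omega)

theorem pvGetD_append_len {α : Type} (xs : List α) (x d : α) :
    PySem.List.pyGetD (xs ++ [x]) (xs.length : Int) d = x := by
  rw [PySem.List.pyGetD_eq_getElem (xs ++ [x]) d (by positivity) (by simp)]
  simp

-- pvRed on an appended element
theorem pvRed_append (ys : List Int) (x : Int) (h : ys ≠ []) :
    pvRed (ys ++ [x]) =
      pvRed ys ++ (if x ≠ ys.getD (ys.length - 1) 0 then [((ys.length : Int), x)] else []) := by
  have hn : 0 < ys.length := List.length_pos_of_ne_nil h
  unfold pvRed
  rw [PySem.List.enumerate_append, PySem.List.enumerate_cons, PySem.List.enumerate_nil,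
      List.filter_append]
  congr 1
  · apply List.filter_congr
    intro pn hpn
    rw [PySem.List.enumerate_eq_map_pyRange ys 0] at hpn
    obtain ⟨j, hj, rfl⟩ := List.mem_map.mp hpn
    rw [PySem.List.mem_pyRange_one] at hj
    simp only [PySem.List.len_eq] at hj
    by_cases hj0 : j = 0
    · subst hj0; simp
    · rw [pvGetD_append_lt ys x 0 (j - 1) (by omega) (by omega)]
  · -- the appended element (0 + ↑n, x)
    have hx : (0 : Int) + (ys.length : Int) = (ys.length : Int) := by ring
    rw [hx]
    have hi : ((ys.length : Int) - 1) = ((ys.length - 1 : Nat) : Int) := by omega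
    have hr : PySem.List.pyGetD (ys ++ [x]) ((ys.length : Int) - 1) 0
        = ys.getD (ys.length - 1) 0 := by
      rw [pvGetD_append_lt ys x 0 _ (by omega) (by omega), hi, PySem.List.pyGetD_natCast]
    simp only [List.filter_cons, List.filter_nil, hr]
    have hb : (((ys.length : Nat) : Int) == 0) = false := by
      rw [beq_eq_false_iff_ne]; omega
    rw [hb, Bool.false_or]
    by_cases he : x = ys.getD (ys.length - 1) 0 <;> simp [he]

-- map-of-filter congruence on members
theorem pvMapFilterCongr {α β : Type} {l : List α} {p q : α → Bool} {f g : α → β}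
    (hp : ∀ x ∈ l, p x = q x) (hf : ∀ x ∈ l, f x = g x) :
    (l.filter p).map f = (l.filter q).map g := by
  rw [List.filter_congr hp]
  exact List.map_congr_left fun x hx => hf x (List.mem_filter.mp hx).1

-- pvPk on an appended element
theorem pvPk_append (r : List (Int × Int)) (e : Int × Int) :
    pvPk (r ++ [e]) =
      pvPk r ++ (if 2 ≤ r.length ∧ e.2 < (r.getD (r.length - 1) (0, 0)).2 ∧
                    (r.getD (r.length - 2) (0, 0)).2 < (r.getD (r.length - 1) (0, 0)).2
                 then [r.getD (r.length - 1) (0, 0)] else []) := by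
  by_cases hm : 2 ≤ r.length
  · have hread : ∀ j : Int, 0 ≤ j → j < r.length →
        PySem.List.pyGetD (r ++ [e]) j (0, 0) = PySem.List.pyGetD r j (0, 0) :=
      fun j h0 h1 => pvGetD_append_lt r e (0, 0) j h0 h1
    have e1 : PySem.List.pyGetD (r ++ [e]) ((r.length : Int) - 1) (0, 0)
        = r.getD (r.length - 1) (0, 0) := by
      rw [hread _ (by omega) (by omega),
          show ((r.length : Int) - 1) = ((r.length - 1 : Nat) : Int) by omega,
          PySem.List.pyGetD_natCast]
    have e2 : PySem.List.pyGetD (r ++ [e]) ((r.length : Int) - 1 + 1) (0, 0) = e := by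
      rw [show ((r.length : Int) - 1 + 1) = ((r.length : Nat) : Int) by ring]
      exact pvGetD_append_len r e (0, 0)
    have e3 : PySem.List.pyGetD (r ++ [e]) ((r.length : Int) - 1 - 1) (0, 0)
        = r.getD (r.length - 2) (0, 0) := by
      rw [hread _ (by omega) (by omega),
          show ((r.length : Int) - 1 - 1) = ((r.length - 2 : Nat) : Int) by omega,
          PySem.List.pyGetD_natCast]
    unfold pvPk
    rw [show ((r ++ [e]).length : Int) - 1 = ((r.length : Int) - 1) + 1 by simp,
        PySem.List.pyRange_one_succ_right (by omega), List.filter_append, List.map_append]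
    congr 1
    · apply pvMapFilterCongr
      · intro i hi
        rw [PySem.List.mem_pyRange_one] at hi
        rw [hread (i + 1) (by omega) (by omega), hread i (by omega) (by omega),
            hread (i - 1) (by omega) (by omega)]
      · intro i hi
        rw [PySem.List.mem_pyRange_one] at hi
        rw [hread i (by omega) (by omega)]
    · simp only [List.filter_cons, List.filter_nil, e1, e2, e3]
      split_ifs with h1 h2 h3
      · rw [List.map_cons, List.map_nil, e1]
      · simp only [decide_eq_true_eq] at h1
        exact absurd ⟨hm, h1⟩ h2
      · simp only [decide_eq_true_eq] at h1
        exact absurd h3.2 h1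
      · rfl
  · have h1 : pvPk r = [] := by
      unfold pvPk
      rw [PySem.List.pyRange_one_eq_nil (by omega)]
      rfl
    have h2 : pvPk (r ++ [e]) = [] := by
      unfold pvPk
      rw [PySem.List.pyRange_one_eq_nil (by simp; omega)]
      rfl
    simp [h1, h2, hm]

-- B's loop on an appended element
theorem pvLoopB_append (ys : List Int) (x : Int) (h : ys ≠ []) :
    pvLoopB (ys ++ [x]) = pvStepB (ys ++ [x]) (pvLoopB ys) (ys.length : Int) := by
  have hn : 0 < ys.length := List.length_pos_of_ne_nil h
  unfold pvLoopB
  have h1 : ((ys ++ [x]).length : Int) = (ys.length : Int) + 1 := by simp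
  rw [h1, PySem.List.pyRange_one_succ_right (by exact_mod_cast hn), List.foldl_append]
  simp only [List.foldl_cons, List.foldl_nil]
  congr 1
  apply PySem.List.foldl_congr_mem
  intro acc i hi
  rw [PySem.List.mem_pyRange_one] at hi
  unfold pvStepB
  rw [pvGetD_append_lt ys x 0 i (by omega) (by omega),
      pvGetD_append_lt ys x 0 (i - 1) (by omega) (by omega)]

-- the coupling invariant between A's data and B's loop state
def pvInv (arr : List Int) : Prop :=
  pvRed arr ≠ [] ∧
  ((pvRed arr).getD ((pvRed arr).length - 1) (0, 0)).2 = arr.getD (arr.length - 1) 0 ∧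
  (pvLoopB arr).2.1 = (pvPk (pvRed arr)).map (·.1) ∧
  (pvLoopB arr).2.2 = (pvPk (pvRed arr)).map (·.2) ∧
  (pvLoopB arr).1 =
    (if 2 ≤ (pvRed arr).length ∧
        ((pvRed arr).getD ((pvRed arr).length - 2) (0, 0)).2 <
          ((pvRed arr).getD ((pvRed arr).length - 1) (0, 0)).2
     then some ((pvRed arr).getD ((pvRed arr).length - 1) (0, 0)) else none)

-- Nat-index getD on a one-element append
theorem pvGetD_concat_len {α : Type} (xs : List α) (x d : α) :
    (xs ++ [x]).getD xs.length d = x := by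
  simp [List.getD]

theorem pvInv_holds : ∀ (arr : List Int), arr ≠ [] → pvInv arr := by
  intro arr
  induction arr using List.reverseRecOn with
  | nil => intro h; exact absurd rfl h
  | append_singleton ys x ih =>
    intro _
    rcases eq_or_ne ys [] with rfl | hys
    · -- base: arr = [x]
      have hred : pvRed [x] = [(0, x)] := by
        simp [pvRed, PySem.List.enumerate_cons, PySem.List.enumerate_nil, List.filter]
      have hloop : pvLoopB [x] = (none, [], []) := by
        unfold pvLoopB
        rw [show (([x] : List Int).length : Int) = 1 by simp, PySem.List.pyRange_one_eq_nil le_rfl]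
        rfl
      have hpk : pvPk [((0 : Int), x)] = [] := by
        unfold pvPk
        rw [PySem.List.pyRange_one_eq_nil (by norm_num)]
        rfl
      unfold pvInv
      simp only [List.nil_append]
      rw [hred, hloop, hpk]
      norm_num
    · obtain ⟨hr, hv, hp1, hp2, hl⟩ := ih hys
      have hn : 0 < ys.length := List.length_pos_of_ne_nil hys
      have hm : 0 < (pvRed ys).length := List.length_pos_of_ne_nil hr
      have hx1 : PySem.List.pyGetD (ys ++ [x]) ((ys.length : Int)) 0 = x :=
        pvGetD_append_len ys x 0
      have hx0 : PySem.List.pyGetD (ys ++ [x]) ((ys.length : Int) - 1) 0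
          = ys.getD (ys.length - 1) 0 := by
        rw [pvGetD_append_lt ys x 0 _ (by omega) (by omega),
            show ((ys.length : Int) - 1) = ((ys.length - 1 : Nat) : Int) by omega,
            PySem.List.pyGetD_natCast]
      have hstep := pvLoopB_append ys x hys
      unfold pvStepB at hstep
      rw [hx1, hx0] at hstep
      have glast : ((pvRed ys ++ [((ys.length : Int), x)]).length - 1) = (pvRed ys).length := by
        simp
      have gpen : ((pvRed ys ++ [((ys.length : Int), x)]).length - 2) = (pvRed ys).length - 1 := by
        simp
      have gys : ((ys ++ [x]).length - 1) = ys.length := by simp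
      rcases lt_trichotomy x (ys.getD (ys.length - 1) 0) with hcmp | hcmp | hcmp
      · -- strict decrease: a peak may be emitted
        rw [if_neg (by omega), if_pos hcmp] at hstep
        have hcmp' : x < ((pvRed ys).getD ((pvRed ys).length - 1) (0, 0)).2 := by
          rw [hv]; exact hcmp
        have hredx := pvRed_append ys x hys
        rw [if_pos (by omega)] at hredx
        have hpkx := pvPk_append (pvRed ys) ((ys.length : Int), x)
        by_cases hc : 2 ≤ (pvRed ys).length ∧
            ((pvRed ys).getD ((pvRed ys).length - 2) (0, 0)).2 <
              ((pvRed ys).getD ((pvRed ys).length - 1) (0, 0)).2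
        · rw [if_pos hc] at hl
          rw [hl] at hstep
          rw [if_pos ⟨hc.1, hcmp', hc.2⟩] at hpkx
          have hstep' : pvLoopB (ys ++ [x]) =
              (none,
               (pvLoopB ys).2.1 ++ [((pvRed ys).getD ((pvRed ys).length - 1) (0, 0)).1],
               (pvLoopB ys).2.2 ++ [((pvRed ys).getD ((pvRed ys).length - 1) (0, 0)).2]) := hstep
          unfold pvInv
          rw [hredx, hpkx, hstep']
          refine ⟨by simp, ?_, by simp [hp1], by simp [hp2], ?_⟩
          · rw [glast, pvGetD_concat_len, gys, pvGetD_concat_len]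
          · rw [if_neg ?_]
            rintro ⟨-, hlt⟩
            rw [glast, pvGetD_concat_len, gpen,
                List.getD_append _ _ _ _ (by omega)] at hlt
            exact absurd hlt (by omega)
        · rw [if_neg hc] at hl
          rw [hl] at hstep
          rw [if_neg (by rintro ⟨h1, -, h2⟩; exact hc ⟨h1, h2⟩)] at hpkx
          have hstep' : pvLoopB (ys ++ [x]) = pvLoopB ys := hstep
          unfold pvInv
          rw [hredx, hpkx, hstep']
          refine ⟨by simp, ?_, by simpa using hp1, by simpa using hp2, ?_⟩
          · rw [glast, pvGetD_concat_len, gys, pvGetD_concat_len]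
          · rw [if_neg ?_]
            · exact hl
            · rintro ⟨-, hlt⟩
              rw [glast, pvGetD_concat_len, gpen,
                  List.getD_append _ _ _ _ (by omega)] at hlt
              exact absurd hlt (by omega)
              
      · -- equal: plateau, nothing changes
        rw [if_neg (by omega), if_neg (by omega)] at hstep
        have hredx := pvRed_append ys x hys
        rw [if_neg (by omega)] at hredx
        simp only [List.append_nil] at hredx
        unfold pvInv
        rw [hredx, hstep]
        refine ⟨hr, ?_, hp1, hp2, hl⟩
        rw [gys, pvGetD_concat_len, hv, hcmp]
      · -- strict increase: pending peak is set
        rw [if_pos hcmp] at hstep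
        have hredx := pvRed_append ys x hys
        rw [if_pos (by omega)] at hredx
        have hpkx := pvPk_append (pvRed ys) ((ys.length : Int), x)
        rw [if_neg (by rintro ⟨-, hlt, -⟩; rw [hv] at hlt; exact absurd hlt (by omega))] at hpkx
        unfold pvInv
        rw [hredx, hpkx, hstep]
        refine ⟨by simp, ?_, by simpa using hp1, by simpa using hp2, ?_⟩
        · rw [glast, pvGetD_concat_len, gys, pvGetD_concat_len]
        · rw [if_pos ?_, glast, pvGetD_concat_len]
          constructor
          · simp only [List.length_append, List.length_cons, List.length_nil]
            omega
          · rw [glast, pvGetD_concat_len, gpen, List.getD_append _ _ _ _ (by omega), hv]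
            exact hcmp

-- ===== VERDICT (by name: the statement is the Claim_ definition above) =====
theorem pick_peaks_spec : Claim_equal_pick_peaks := by
  intro arr _
  unfold Spec_pick_peaks
  rcases eq_or_ne arr [] with rfl | h
  · decide
  · obtain ⟨hr, hv, hp1, hp2, hl⟩ := pvInv_holds arr h
    show pick_peaks arr = pick_peaks_alt arr
    unfold pick_peaks pick_peaks_alt
    rw [hp1, hp2]
    rcases eq_or_ne (pvPk (pvRed arr)) [] with he | he <;> simp [he]
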